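-- pv_equiv track=rewrite | github.com/loglux/ipxe-station | app/tests.py | _generate_final_status_with_ubuntu
-- ===== SOURCE A (Python) =====
-- from typing import List, Tuple, Dict, Any
--
-- def _generate_final_status_with_ubuntu(test_results: List[str]) -> List[str]:
--     """Generate final status with Ubuntu version awareness"""
--     status_lines = [""]
--
--     # Check for working Ubuntu versions
--     ubuntu_versions_working = any("Working Ubuntu versions" in result for result in test_results)
--     tftp_working = any("TFTP test: SUCCESS" in result for result in test_results)
--     ipxe_files_present = any("undionly.kpxe" in result and "Found" in result for result in test_results)
--
--     if ubuntu_versions_working and tftp_working and ipxe_files_present: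
--         status_lines.extend([
--             "🎉 READY FOR PXE BOOT TESTING!",
--             "📋 Ubuntu installations, TFTP, and iPXE components are working",
--             "",
--             "🔍 Next steps:",
--             "1. Configure DHCP: Option 66 = YOUR_SERVER_IP, Option 67 = undionly.kpxe",
--             "2. Boot test computer via network (PXE)",
--             "3. Use 'Create Smart Menu' to generate multi-mode iPXE menu",
--             "4. Or test with QEMU emulator"
--         ])
--     elif ubuntu_versions_working and tftp_working:
--         status_lines.extend([
--             "⚠️ MOSTLY READY",
--             "✅ Ubuntu files and TFTP found, but check iPXE components",
--             "",
--             "🔧 Please check:",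
--             "1. Verify iPXE files (undionly.kpxe, ipxe.efi)",
--             "2. Generate iPXE menu configuration"
--         ])
--     elif ubuntu_versions_working:
--         status_lines.extend([
--             "⚠️ PARTIALLY READY",
--             "✅ Ubuntu files found, but TFTP may not be working",
--             "",
--             "🔧 Please check:",
--             "1. Start TFTP server",
--             "2. Verify iPXE files (undionly.kpxe, ipxe.efi)",
--             "3. Generate iPXE menu configuration"
--         ])
--     else:
--         status_lines.extend([
--             "⚠️ SYSTEM NOT READY",
--             "❌ No complete Ubuntu installations found",
--             "",
--             "🔧 Please check:",
--             "1. Download Ubuntu files using Ubuntu Download tab",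
--             "2. Verify Ubuntu files are in /srv/http/ubuntu-XX.XX/ structure",
--             "3. Start TFTP server if needed",
--             "4. Generate iPXE menu",
--             "5. Verify file permissions"
--         ])
--
--     return status_lines
-- ===== SOURCE B (Python) =====
-- from typing import List
--
-- _TAILS = (
--     [
--         "⚠️ SYSTEM NOT READY",
--         "❌ No complete Ubuntu installations found",
--         "",
--         "🔧 Please check:",
--         "1. Download Ubuntu files using Ubuntu Download tab",
--         "2. Verify Ubuntu files are in /srv/http/ubuntu-XX.XX/ structure",
--         "3. Start TFTP server if needed",
--         "4. Generate iPXE menu",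
--         "5. Verify file permissions",
--     ],
--     [
--         "⚠️ PARTIALLY READY",
--         "✅ Ubuntu files found, but TFTP may not be working",
--         "",
--         "🔧 Please check:",
--         "1. Start TFTP server",
--         "2. Verify iPXE files (undionly.kpxe, ipxe.efi)",
--         "3. Generate iPXE menu configuration",
--     ],
--     [
--         "⚠️ MOSTLY READY",
--         "✅ Ubuntu files and TFTP found, but check iPXE components",
--         "",
--         "🔧 Please check:",
--         "1. Verify iPXE files (undionly.kpxe, ipxe.efi)",
--         "2. Generate iPXE menu configuration",
--     ],
--     [
--         "🎉 READY FOR PXE BOOT TESTING!",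
--         "📋 Ubuntu installations, TFTP, and iPXE components are working",
--         "",
--         "🔍 Next steps:",
--         "1. Configure DHCP: Option 66 = YOUR_SERVER_IP, Option 67 = undionly.kpxe",
--         "2. Boot test computer via network (PXE)",
--         "3. Use 'Create Smart Menu' to generate multi-mode iPXE menu",
--         "4. Or test with QEMU emulator",
--     ],
-- )
--
--
-- def _generate_final_status_with_ubuntu(test_results: List[str]) -> List[str]:
--     """Readiness level computed by an early-terminating scan, then a table lookup."""
--     ubuntu = tftp = ipxe = False
--     for result in test_results:
--         if ubuntu and tftp and ipxe:
--             break
--         ubuntu = ubuntu or "Working Ubuntu versions" in result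
--         tftp = tftp or "TFTP test: SUCCESS" in result
--         ipxe = ipxe or ("undionly.kpxe" in result and "Found" in result)
--     level = int(ubuntu) + int(ubuntu and tftp) + int(ubuntu and tftp and ipxe)
--     return [""] + _TAILS[level]
-- ===== Notes on version B (the rewrite author's own statement) =====
-- stated objective: alternative
-- what changed: B replaces A's three any() scans and 4-way if/elif chain by a single early-terminating scan that accumulates the three flags (stopping once all hold) and an arithmetic readiness level int(u)+int(u and t)+int(u and t and i) indexing a constant 4-entry message table.
import Mathlib
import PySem

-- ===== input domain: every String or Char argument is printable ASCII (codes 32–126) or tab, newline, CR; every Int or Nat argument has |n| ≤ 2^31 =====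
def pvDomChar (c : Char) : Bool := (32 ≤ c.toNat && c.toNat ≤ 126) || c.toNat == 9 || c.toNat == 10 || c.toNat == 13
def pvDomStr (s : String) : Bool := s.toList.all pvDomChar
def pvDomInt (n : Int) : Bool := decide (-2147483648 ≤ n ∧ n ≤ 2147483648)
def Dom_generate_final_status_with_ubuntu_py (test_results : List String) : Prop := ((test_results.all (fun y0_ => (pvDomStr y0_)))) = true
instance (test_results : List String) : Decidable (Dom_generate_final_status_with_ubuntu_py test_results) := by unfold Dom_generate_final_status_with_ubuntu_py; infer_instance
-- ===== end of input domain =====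

-- B: one early-terminating flag scan plus an arithmetic readiness level indexing a message table,
-- instead of A's three any() scans and if/elif chain; same messages, proved equal.

-- ===== PORT A =====
def generate_final_status_with_ubuntu_py (test_results : List String) : List String :=
  let status_lines : List String := [""]
  let ubuntu_versions_working := test_results.any (fun result => PySem.Str.isIn "Working Ubuntu versions" result)
  let tftp_working := test_results.any (fun result => PySem.Str.isIn "TFTP test: SUCCESS" result)
  let ipxe_files_present := test_results.any (fun result => PySem.Str.isIn "undionly.kpxe" result && PySem.Str.isIn "Found" result)
  if ubuntu_versions_working && tftp_working && ipxe_files_present then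
    status_lines ++ ["🎉 READY FOR PXE BOOT TESTING!",
     "📋 Ubuntu installations, TFTP, and iPXE components are working",
     "",
     "🔍 Next steps:",
     "1. Configure DHCP: Option 66 = YOUR_SERVER_IP, Option 67 = undionly.kpxe",
     "2. Boot test computer via network (PXE)",
     "3. Use 'Create Smart Menu' to generate multi-mode iPXE menu",
     "4. Or test with QEMU emulator"]
  else if ubuntu_versions_working && tftp_working then
    status_lines ++ ["⚠️ MOSTLY READY",
     "✅ Ubuntu files and TFTP found, but check iPXE components",
     "",
     "🔧 Please check:",
     "1. Verify iPXE files (undionly.kpxe, ipxe.efi)",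
     "2. Generate iPXE menu configuration"]
  else if ubuntu_versions_working then
    status_lines ++ ["⚠️ PARTIALLY READY",
     "✅ Ubuntu files found, but TFTP may not be working",
     "",
     "🔧 Please check:",
     "1. Start TFTP server",
     "2. Verify iPXE files (undionly.kpxe, ipxe.efi)",
     "3. Generate iPXE menu configuration"]
  else
    status_lines ++ ["⚠️ SYSTEM NOT READY",
     "❌ No complete Ubuntu installations found",
     "",
     "🔧 Please check:",
     "1. Download Ubuntu files using Ubuntu Download tab",
     "2. Verify Ubuntu files are in /srv/http/ubuntu-XX.XX/ structure",
     "3. Start TFTP server if needed",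
     "4. Generate iPXE menu",
     "5. Verify file permissions"]

-- ===== PORT B =====
-- the constant message table _TAILS, indexed by readiness level 0..3
def pvTails : Nat → List String
  | 0 => ["⚠️ SYSTEM NOT READY",
     "❌ No complete Ubuntu installations found",
     "",
     "🔧 Please check:",
     "1. Download Ubuntu files using Ubuntu Download tab",
     "2. Verify Ubuntu files are in /srv/http/ubuntu-XX.XX/ structure",
     "3. Start TFTP server if needed",
     "4. Generate iPXE menu",
     "5. Verify file permissions"]
  | 1 => ["⚠️ PARTIALLY READY",
     "✅ Ubuntu files found, but TFTP may not be working",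
     "",
     "🔧 Please check:",
     "1. Start TFTP server",
     "2. Verify iPXE files (undionly.kpxe, ipxe.efi)",
     "3. Generate iPXE menu configuration"]
  | 2 => ["⚠️ MOSTLY READY",
     "✅ Ubuntu files and TFTP found, but check iPXE components",
     "",
     "🔧 Please check:",
     "1. Verify iPXE files (undionly.kpxe, ipxe.efi)",
     "2. Generate iPXE menu configuration"]
  | _ => ["🎉 READY FOR PXE BOOT TESTING!",
     "📋 Ubuntu installations, TFTP, and iPXE components are working",
     "",
     "🔍 Next steps:",
     "1. Configure DHCP: Option 66 = YOUR_SERVER_IP, Option 67 = undionly.kpxe",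
     "2. Boot test computer via network (PXE)",
     "3. Use 'Create Smart Menu' to generate multi-mode iPXE menu",
     "4. Or test with QEMU emulator"]

-- the early-terminating flag scan (Source B's loop with break)
def pvScan : List String → Bool → Bool → Bool → Bool × Bool × Bool
  | [], u, t, i => (u, t, i)
  | result :: rest, u, t, i =>
      if u && t && i then (u, t, i)
      else pvScan rest
        (u || PySem.Str.isIn "Working Ubuntu versions" result)
        (t || PySem.Str.isIn "TFTP test: SUCCESS" result)
        (i || (PySem.Str.isIn "undionly.kpxe" result && PySem.Str.isIn "Found" result))

def generate_final_status_with_ubuntu_py_alt (test_results : List String) : List String :=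
  let f := pvScan test_results false false false
  let u := f.1
  let t := f.2.1
  let i := f.2.2
  let level : Nat := (cond u 1 0) + (cond (u && t) 1 0) + (cond (u && t && i) 1 0)
  [""] ++ pvTails level

-- ===== PRECONDITION & SPEC =====
def Spec_generate_final_status_with_ubuntu_py (test_results : List String) (out : List String) : Prop := out = generate_final_status_with_ubuntu_py_alt test_results
instance (test_results : List String) (out : List String) : Decidable (Spec_generate_final_status_with_ubuntu_py test_results out) := by unfold Spec_generate_final_status_with_ubuntu_py; infer_instance

-- ===== CLAIM =====
def Claim_equal_generate_final_status_with_ubuntu_py : Prop := ∀ (test_results : List String), Dom_generate_final_status_with_ubuntu_py test_results → Spec_generate_final_status_with_ubuntu_py test_results (generate_final_status_with_ubuntu_py test_results)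

-- ===== LEMMAS AND PROOFS =====
theorem pvScan_eq (xs : List String) (u t i : Bool) :
    pvScan xs u t i =
      (u || xs.any (fun r => PySem.Str.isIn "Working Ubuntu versions" r),
       t || xs.any (fun r => PySem.Str.isIn "TFTP test: SUCCESS" r),
       i || xs.any (fun r => PySem.Str.isIn "undionly.kpxe" r && PySem.Str.isIn "Found" r)) := by
  induction xs generalizing u t i with
  | nil => simp [pvScan]
  | cons x xs ih =>
    by_cases h : (u && t && i) = true
    · obtain ⟨⟨hu, ht⟩, hi⟩ : (u = true ∧ t = true) ∧ i = true := by
        simpa [Bool.and_eq_true] using h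
      simp [pvScan, hu, ht, hi]
    · rw [pvScan, if_neg h, ih]
      simp [Bool.or_assoc]

-- ===== VERDICT =====
theorem generate_final_status_with_ubuntu_py_spec : Claim_equal_generate_final_status_with_ubuntu_py := by
  intro test_results _
  unfold Spec_generate_final_status_with_ubuntu_py
  unfold generate_final_status_with_ubuntu_py generate_final_status_with_ubuntu_py_alt
  simp only [pvScan_eq, Bool.false_or]
  cases test_results.any (fun r => PySem.Str.isIn "Working Ubuntu versions" r) <;>
    cases test_results.any (fun r => PySem.Str.isIn "TFTP test: SUCCESS" r) <;>
      cases test_results.any (fun r => PySem.Str.isIn "undionly.kpxe" r && PySem.Str.isIn "Found" r) <;>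
        rfl
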